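-- pv_equiv track=rewrite | github.com/bipentihexium/wys_arg_tools | wys_decrypt.py | humanscantsolvethis_decrypt
-- ===== SOURCE A (Python) =====
-- def humanscantsolvethis_decrypt(data, key):
-- 	key = [ord(c)-64 for c in key]
-- 	index = 0
-- 	keyindex = 0
-- 	result = ""
-- 	while data:
-- 		index = (index + key[keyindex]) % len(data)
-- 		keyindex = (keyindex + 1) % len(key)
-- 		result += data[index]
-- 		data = data[:index] + data[index+1:]
-- 	return result
-- ===== SOURCE B (Python) =====
-- def humanscantsolvethis_decrypt(data, key):
--     # Order-statistic binary tree: pick-and-delete the k-th remaining char in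
--     # O(log n) instead of slicing the whole string each round.
--     if not data:
--         return ""
--     ks = [ord(c) - 64 for c in key]
--     klen = len(ks)
--
--     def build(lo, hi):  # segment of data, hi - lo >= 1; node = (leftsize, l, r)
--         if hi - lo == 1:
--             return data[lo]
--         mid = (lo + hi) // 2
--         return (mid - lo, build(lo, mid), build(mid, hi))
--
--     def pick(t, k):  # k-th leaf (0-based) of t; returns (char, tree-without-it or None)
--         if isinstance(t, str):
--             return t, None
--         ls, l, r = t
--         if k < ls:
--             c, l2 = pick(l, k)
--             return c, (r if l2 is None else (ls - 1, l2, r))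
--         c, r2 = pick(r, k - ls)
--         return c, (l if r2 is None else (ls, l, r2))
--
--     n = len(data)
--     t = build(0, n)
--     idx = 0
--     ki = 0
--     out = []
--     rem = n
--     while rem:
--         idx = (idx + ks[ki % klen]) % rem
--         ki += 1
--         c, t = pick(t, idx)
--         out.append(c)
--         rem -= 1
--     return "".join(out)
-- ===== Notes on version B (the rewrite author's own statement) =====
-- stated objective: faster
-- what changed: Instead of rebuilding the whole string by slicing after every pick (quadratic), B builds an order-statistic binary tree over the characters once and selects-and-deletes the k-th remaining character in O(log n) per round.
import Mathlib
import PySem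

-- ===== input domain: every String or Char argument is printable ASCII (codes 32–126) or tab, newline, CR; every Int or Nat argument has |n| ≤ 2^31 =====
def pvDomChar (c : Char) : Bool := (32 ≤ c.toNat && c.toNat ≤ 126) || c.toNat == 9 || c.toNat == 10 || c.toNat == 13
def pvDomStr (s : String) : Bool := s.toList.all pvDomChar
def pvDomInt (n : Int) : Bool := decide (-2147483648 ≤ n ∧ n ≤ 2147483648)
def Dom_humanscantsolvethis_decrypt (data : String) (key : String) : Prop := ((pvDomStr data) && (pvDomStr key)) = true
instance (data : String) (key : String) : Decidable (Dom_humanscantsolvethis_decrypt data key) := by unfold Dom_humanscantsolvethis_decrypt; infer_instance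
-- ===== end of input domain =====

-- B replaces A's pick-then-slice of the whole shrinking string each round by an
-- order-statistic binary tree (select & delete the k-th remaining char); measured faster on large inputs.

-- ===== PORT A =====
-- termination helper for A's loop: removing one char shortens the list (cited by decreasing_by)
theorem pvA_dec (data : List Char) (i : Int) (h0 : 0 ≤ i) (h1 : i < (data.length : Int)) :
    (PySem.List.slice data none (some i) ++ PySem.List.slice data (some (i + 1)) none).length
      < data.length := by
  rw [PySem.List.slice_to data h0, PySem.List.slice_from data (by omega)]
  simp only [List.length_append, List.length_take, List.length_drop]
  omega

-- the 'while data:' loop of A, carrying (data, key list, index, keyindex, result)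
def pvALoop (data : List Char) (keyl : List Int) (index keyindex : Int)
    (result : List Char) : List Char :=
  if h : data = [] then result
  else
    let index' := PySem.Int.mod (index + (PySem.List.pyGet? keyl keyindex).getD 0)
                    (data.length : Int)
    let keyindex' := PySem.Int.mod (keyindex + 1) (keyl.length : Int)
    let c := (PySem.List.pyGet? data index').getD default
    pvALoop (PySem.List.slice data none (some index')
              ++ PySem.List.slice data (some (index' + 1)) none)
      keyl index' keyindex' (result ++ [c])
termination_by data.length
decreasing_by
  have hl : (0 : Int) < (data.length : Int) := by exact_mod_cast List.length_pos_iff.mpr h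
  exact pvA_dec data _ (PySem.Int.mod_nonneg _ hl) (PySem.Int.mod_lt _ hl)

def humanscantsolvethis_decrypt (data : String) (key : String) : String :=
  String.ofList (pvALoop data.toList (key.toList.map (fun c => ((c.toNat : Int) - 64))) 0 0 [])

-- ===== PORT B =====
-- order-statistic tree: a leaf per char, inner nodes store the leaf count of their left subtree
inductive PvTree : Type
  | leaf : Char → PvTree
  | node : Nat → PvTree → PvTree → PvTree
deriving DecidableEq, Repr

-- build(lo, hi) of Source B, over the sublist it covers
def pvBuild (l : List Char) : PvTree :=
  if h : l.length ≤ 1 then .leaf (l.headD ' ')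
  else .node (l.length / 2) (pvBuild (l.take (l.length / 2))) (pvBuild (l.drop (l.length / 2)))
termination_by l.length
decreasing_by
  · simp only [List.length_take]; omega
  · simp only [List.length_drop]; omega

-- pick(t, k) of Source B: the k-th remaining char and the tree without it (none = tree emptied)
def pvPick : PvTree → Nat → Char × Option PvTree
  | .leaf c, _ => (c, none)
  | .node ls l r, k =>
    if k < ls then
      match pvPick l k with
      | (c, none) => (c, some r)
      | (c, some l2) => (c, some (.node (ls - 1) l2 r))
    else
      match pvPick r (k - ls) with
      | (c, none) => (c, some l)
      | (c, some r2) => (c, some (.node ls l r2))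

-- the 'while rem:' loop of Source B
def pvBLoop : Option PvTree → List Int → Int → Nat → List Char → Nat → List Char
  | _, _, _, _, acc, 0 => acc
  | t?, ks, idx, ki, acc, rem + 1 =>
    let idx' := PySem.Int.mod (idx + ks.getD (ki % ks.length) 0) ((rem : Int) + 1)
    match t? with
    | none => acc
    | some t =>
      match pvPick t idx'.toNat with
      | (c, t') => pvBLoop t' ks idx' (ki + 1) (acc ++ [c]) rem

def humanscantsolvethis_decrypt_alt (data : String) (key : String) : String :=
  let l := data.toList
  if l.isEmpty then ""
  else
    let ks := key.toList.map (fun c => (c.toNat : Int) - 64)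
    String.ofList (pvBLoop (some (pvBuild l)) ks 0 0 [] l.length)

-- ===== PRECONDITION & SPEC =====
-- Pre_ excludes exactly the inputs on which A raises (IndexError on key[0] for an empty key
-- while data is nonempty); B raises there too (ZeroDivisionError), so nothing is hidden.
def Pre_humanscantsolvethis_decrypt (data : String) (key : String) : Prop :=
  data = "" ∨ key ≠ ""
instance (data : String) (key : String) : Decidable (Pre_humanscantsolvethis_decrypt data key) := by
  unfold Pre_humanscantsolvethis_decrypt; infer_instance
def pvWitness_humanscantsolvethis_decrypt : String × String := ("hello", "KEY")

def Spec_humanscantsolvethis_decrypt (data : String) (key : String) (out : String) : Prop :=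
  out = humanscantsolvethis_decrypt_alt data key
instance (data : String) (key : String) (out : String) :
    Decidable (Spec_humanscantsolvethis_decrypt data key out) := by
  unfold Spec_humanscantsolvethis_decrypt; infer_instance

-- ===== CLAIM (what is proved, stated in full; the proofs are below) =====
def Claim_equal_humanscantsolvethis_decrypt : Prop :=
  ∀ (data : String) (key : String), Dom_humanscantsolvethis_decrypt data key →
    Pre_humanscantsolvethis_decrypt data key →
    Spec_humanscantsolvethis_decrypt data key (humanscantsolvethis_decrypt data key)

-- ===== LEMMAS AND PROOFS =====

-- leaves of a tree, left to right
def PvTree.toL : PvTree → List Char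
  | .leaf c => [c]
  | .node _ l r => l.toL ++ r.toL

-- well-formedness: each node's stored size is its left subtree's leaf count
def PvWF : PvTree → Prop
  | .leaf _ => True
  | .node ls l r => ls = l.toL.length ∧ PvWF l ∧ PvWF r

def pvOptL : Option PvTree → List Char
  | none => []
  | some t => t.toL

def pvOptWF : Option PvTree → Prop
  | none => True
  | some t => PvWF t

theorem pvBuild_toL (l : List Char) (h : l ≠ []) : (pvBuild l).toL = l := by
  fun_induction pvBuild l with
  | case1 l hle =>
    obtain ⟨a, rfl⟩ : ∃ a, l = [a] := by
      cases l with
      | nil => exact absurd rfl h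
      | cons a t => cases t with
        | nil => exact ⟨a, rfl⟩
        | cons b t => simp at hle
    rfl
  | case2 l hle ih1 ih2 =>
    have h2 : 2 ≤ l.length := by omega
    have ht : l.take (l.length / 2) ≠ [] := by
      intro e
      have := congrArg List.length e
      simp only [List.length_take, List.length_nil] at this; omega
    have hd : l.drop (l.length / 2) ≠ [] := by
      intro e
      have := congrArg List.length e
      simp only [List.length_drop, List.length_nil] at this; omega
    simp only [PvTree.toL, ih1 ht, ih2 hd, List.take_append_drop]

theorem pvBuild_wf (l : List Char) : PvWF (pvBuild l) := by
  fun_induction pvBuild l with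
  | case1 l hle => trivial
  | case2 l hle ih1 ih2 =>
    refine ⟨?_, ih1, ih2⟩
    rw [pvBuild_toL _ (by
      intro e
      have := congrArg List.length e
      simp only [List.length_take, List.length_nil] at this; omega)]
    simp only [List.length_take]; omega

theorem pvPick_spec (t : PvTree) (k : Nat) (hwf : PvWF t) (hk : k < t.toL.length) :
    (pvPick t k).1 = t.toL.getD k default ∧
    pvOptL (pvPick t k).2 = t.toL.eraseIdx k ∧
    pvOptWF (pvPick t k).2 := by
  induction t generalizing k with
  | leaf c =>
    simp only [PvTree.toL, List.length_cons, List.length_nil] at hk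
    interval_cases k
    exact ⟨rfl, rfl, trivial⟩
  | node ls l r ihl ihr =>
    obtain ⟨hls, wl, wr⟩ := hwf
    simp only [PvTree.toL, List.length_append] at hk
    by_cases hklt : k < ls
    · have hkl : k < l.toL.length := by omega
      obtain ⟨s1, s2, s3⟩ := ihl k wl hkl
      simp only [pvPick, if_pos hklt, PvTree.toL]
      rcases hp : pvPick l k with ⟨c, l2⟩
      rw [hp] at s1 s2 s3
      cases l2 with
      | none =>
        simp only [pvOptL] at s2
        refine ⟨by rw [s1, List.getD_append _ _ _ _ hkl], ?_, wr⟩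
        simp only [pvOptL, List.eraseIdx_append_of_lt_length hkl, ← s2, List.nil_append]
      | some l2 =>
        simp only [pvOptL] at s2
        refine ⟨by rw [s1, List.getD_append _ _ _ _ hkl], ?_, ?_⟩
        · simp only [pvOptL, PvTree.toL, List.eraseIdx_append_of_lt_length hkl, s2]
        · exact ⟨by rw [s2, List.length_eraseIdx_of_lt hkl]; omega, s3, wr⟩
    · have hge : l.toL.length ≤ k := by omega
      obtain ⟨s1, s2, s3⟩ := ihr (k - ls) wr (by omega)
      simp only [pvPick, if_neg hklt, PvTree.toL]
      rcases hp : pvPick r (k - ls) with ⟨c, r2⟩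
      rw [hp] at s1 s2 s3
      have hsub : k - l.toL.length = k - ls := by omega
      cases r2 with
      | none =>
        simp only [pvOptL] at s2
        refine ⟨?_, ?_, wl⟩
        · rw [s1, List.getD_append_right _ _ _ _ hge, hsub]
        · simp only [pvOptL, List.eraseIdx_append_of_length_le hge, hsub, ← s2, List.append_nil]
      | some r2 =>
        simp only [pvOptL] at s2
        refine ⟨?_, ?_, ⟨hls, wl, s3⟩⟩
        · rw [s1, List.getD_append_right _ _ _ _ hge, hsub]
        · simp only [pvOptL, PvTree.toL, List.eraseIdx_append_of_length_le hge, hsub, s2]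

-- the two loops run in lockstep: B's tree always holds exactly A's remaining string,
-- and A's keyindex is B's running counter mod len(key)
theorem pvLoop_eq (ks : List Int) (hks : ks ≠ []) :
    ∀ (rem : Nat) (l : List Char) (t : PvTree) (idx : Int) (ki : Nat) (acc : List Char),
      PvWF t → t.toL = l → l.length = rem →
      pvALoop l ks idx ((ki % ks.length : Nat) : Int) acc = pvBLoop (some t) ks idx ki acc rem := by
  intro rem
  induction rem with
  | zero =>
    intro l t idx ki acc _ _ hlen
    have : l = [] := List.length_eq_zero_iff.mp hlen
    subst this
    rw [pvALoop, pvBLoop]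
    simp
  | succ rem ih =>
    intro l t idx ki acc hwf htl hlen
    subst htl
    have hne : t.toL ≠ [] := by intro e; rw [e] at hlen; simp at hlen
    have hlpos : (0 : Int) < (t.toL.length : Int) := by exact_mod_cast List.length_pos_iff.mpr hne
    have hkpos : (0 : Int) < (ks.length : Int) := by exact_mod_cast List.length_pos_iff.mpr hks
    -- the key value both read
    have hkv : (PySem.List.pyGet? ks ((ki % ks.length : Nat) : Int)).getD 0
        = ks.getD (ki % ks.length) 0 := by
      rw [PySem.List.pyGet?_natCast, List.getD_eq_getElem?_getD]
    -- the new index both compute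
    set i : Int := PySem.Int.mod (idx + ks.getD (ki % ks.length) 0) (t.toL.length : Int) with hi
    have hi0 : 0 ≤ i := PySem.Int.mod_nonneg _ hlpos
    have hilt : i < (t.toL.length : Int) := PySem.Int.mod_lt _ hlpos
    have him : i.toNat < t.toL.length := by omega
    -- the new key index
    have hkidx : PySem.Int.mod (((ki % ks.length : Nat) : Int) + 1) (ks.length : Int)
        = (((ki + 1) % ks.length : Nat) : Int) := by
      rw [PySem.Int.mod_eq_emod_of_pos hkpos]
      push_cast
      rw [Int.emod_add_emod]
    -- the char both pick
    obtain ⟨s1, s2, s3⟩ := pvPick_spec t i.toNat (hwf) him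
    have hc : (PySem.List.pyGet? t.toL i).getD default = (pvPick t i.toNat).1 := by
      rw [PySem.List.pyGet?_of_nonneg t.toL hi0, List.getD_eq_getElem?_getD.symm, s1]
    -- the new data
    have hdata : PySem.List.slice t.toL none (some i) ++ PySem.List.slice t.toL (some (i + 1)) none
        = t.toL.eraseIdx i.toNat := by
      rw [PySem.List.slice_to t.toL hi0, PySem.List.slice_from t.toL (by omega)]
      have : (i + 1).toNat = i.toNat + 1 := by omega
      rw [this, List.eraseIdx_eq_take_drop_succ]
    rw [pvALoop, dif_neg hne]
    simp only [hkv, ← hi]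
    rw [pvBLoop]
    simp only
    have hmod : PySem.Int.mod (idx + ks.getD (ki % ks.length) 0) ((rem : Int) + 1) = i := by
      rw [hi]; congr 1; omega
    rw [hmod]
    rcases hp : pvPick t i.toNat with ⟨c, t?⟩
    rw [hp] at s1 s2 s3
    simp only
    rw [hdata, hkidx, hc, hp]
    cases t? with
    | none =>
      simp only [pvOptL] at s2
      have hrem : rem = 0 := by
        have := congrArg List.length s2
        simp only [List.length_nil, List.length_eraseIdx_of_lt him] at this
        omega
      subst hrem
      rw [← s2, pvALoop, dif_pos rfl, pvBLoop]
    | some t2 =>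
      exact ih (t.toL.eraseIdx i.toNat) t2 i (ki + 1) (acc ++ [c]) s3
        (by simpa [pvOptL] using s2)
        (by rw [List.length_eraseIdx_of_lt him]; omega)

-- ===== VERDICT (by name: the statement is the Claim_ definition above) =====
theorem humanscantsolvethis_decrypt_spec : Claim_equal_humanscantsolvethis_decrypt := by
  intro data key _ hpre
  unfold Spec_humanscantsolvethis_decrypt
  by_cases hd : data.toList = []
  · simp [humanscantsolvethis_decrypt, humanscantsolvethis_decrypt_alt, hd, pvALoop]
  · have hkey : key ≠ "" := by
      rcases hpre with h | h
      · exact absurd (by rw [h]; rfl) hd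
      · exact h
    have hks : key.toList.map (fun c => ((c.toNat : Int) - 64)) ≠ [] := by
      simp only [ne_eq, List.map_eq_nil_iff]
      intro e; exact hkey (String.toList_eq_nil_iff.mp e)
    have := pvLoop_eq (key.toList.map (fun c => ((c.toNat : Int) - 64))) hks
      data.toList.length data.toList (pvBuild data.toList) 0 0 []
      (pvBuild_wf data.toList) (pvBuild_toL data.toList hd) rfl
    simp only [Nat.zero_mod, Nat.cast_zero] at this
    simp only [humanscantsolvethis_decrypt, humanscantsolvethis_decrypt_alt, this,
      List.isEmpty_iff, if_neg hd]
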